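-- pv_equiv track=rewrite | github.com/billyblu2000/AccoMontage2 | chorderator/core.py | __segmentation_to_phrase
-- ===== SOURCE A (Python) =====
-- def __segmentation_to_phrase(s):
--     phrase = [1]
--     memo = ''
--     for i in s:
--         if i == '\\':
--             return phrase
--         if not i.isdigit():
--             if memo != '':
--                 phrase.append(phrase[-1] + int(memo))
--                 memo = ''
--         else:
--             memo += i
--     return phrase[:-1]
-- ===== SOURCE B (Python) =====
-- def _terminated_runs(body):
--     """The maximal digit runs of body that are terminated by a (non-digit) delimiter, as ints."""
--     nums = []
--     i, n = 0, len(body)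
--     while i < n:
--         if not body[i].isdigit():
--             i += 1
--             continue
--         j = i
--         while j < n and body[j].isdigit():
--             j += 1
--         if j < n:                      # run is followed by a delimiter
--             nums.append(int(body[i:j]))
--         i = j
--     return nums
--
-- def __segmentation_to_phrase(s):
--     body, sep, _tail = s.partition('\\')
--     result = [1]
--     for n in _terminated_runs(body):
--         result.append(result[-1] + n)
--     return result if sep else result[:-1]
-- ===== Notes on version B (the rewrite author's own statement) =====
-- stated objective: idiomatic
-- what changed: A's single-pass character state machine (memo accumulator, flush-on-delimiter, early return on backslash) is replaced by partition-then-group: split off the body before the first backslash, recursively extract the maximal digit runs that are terminated by a delimiter, and fold them into a prefix-sum list.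
import Mathlib
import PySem

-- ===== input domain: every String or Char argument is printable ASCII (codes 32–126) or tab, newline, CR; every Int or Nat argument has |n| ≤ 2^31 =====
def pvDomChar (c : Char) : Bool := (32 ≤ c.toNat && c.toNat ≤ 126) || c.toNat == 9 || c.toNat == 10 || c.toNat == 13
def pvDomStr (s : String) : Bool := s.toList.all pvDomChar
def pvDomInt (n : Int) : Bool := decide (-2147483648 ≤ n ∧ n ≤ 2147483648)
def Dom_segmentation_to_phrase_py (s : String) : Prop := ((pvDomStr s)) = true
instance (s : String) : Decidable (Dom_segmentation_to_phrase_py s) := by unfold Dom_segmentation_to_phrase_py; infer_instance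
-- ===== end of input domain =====

-- B replaces A's streaming character state machine by partition-then-group: split off the body before
-- the first backslash, recursively group the terminated digit runs, and prefix-sum them (objective: idiomatic).


-- ===== PORT A =====
-- int(memo): exact here, since both programs call it only on a nonempty run of ASCII digits
def pvIntOfDigits (cs : List Char) : Int := (PySem.Int.ofChars? cs).getD 0

-- the for-loop of A: state = (phrase, memo); '\\' returns phrase, end of input returns phrase[:-1]
def pvALoop : List Char → List Int → List Char → List Int
  | [], phrase, _memo => PySem.List.slice phrase none (some (-1))
  | i :: rest, phrase, memo =>
    if i = '\\' then phrase
    else if ¬ PySem.Chars.isdigit i then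
      (if memo ≠ [] then
        pvALoop rest (phrase ++ [(PySem.List.pyGet? phrase (-1)).getD 0 + pvIntOfDigits memo]) []
      else pvALoop rest phrase memo)
    else pvALoop rest phrase (memo ++ [i])

def segmentation_to_phrase_py (s : String) : List Int := pvALoop s.toList [1] []

-- ===== PORT B =====
-- _terminated_runs: the while loop over indices i ≤ j is ported as recursion on the remaining suffix body[i:];
-- 'i += 1' drops the head, the inner digit span body[i:j] / body[j:] is c :: takeWhile / dropWhile (exact)
def pvTermRuns : List Char → List Int
  | [] => []
  | c :: cs =>
    if ¬ PySem.Chars.isdigit c then pvTermRuns cs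
    else
      let rest := cs.dropWhile PySem.Chars.isdigit
      let tail := pvTermRuns rest
      if rest = [] then tail
      else pvIntOfDigits (c :: cs.takeWhile PySem.Chars.isdigit) :: tail
  termination_by chars => chars.length
  decreasing_by
  · simp
  · have := List.length_dropWhile_le PySem.Chars.isdigit cs; simp; omega

def segmentation_to_phrase_py_alt (s : String) : List Int :=
  -- s.partition('\\') hand-ported (exact): body = chars before the first backslash, sep nonempty iff one occurs
  let chars := s.toList
  let body := chars.takeWhile (· ≠ '\\')
  let sep := chars.contains '\\'
  let result := (pvTermRuns body).foldl
    (fun r n => r ++ [(PySem.List.pyGet? r (-1)).getD 0 + n]) [1]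
  if sep then result else PySem.List.slice result none (some (-1))

-- ===== PRECONDITION & SPEC =====
def Spec_segmentation_to_phrase_py (s : String) (out : List Int) : Prop := out = segmentation_to_phrase_py_alt s
instance (s : String) (out : List Int) : Decidable (Spec_segmentation_to_phrase_py s out) := by unfold Spec_segmentation_to_phrase_py; infer_instance

-- ===== CLAIM (what is proved, stated in full; the proofs are below) =====
def Claim_equal_segmentation_to_phrase_py : Prop := ∀ (s : String), Dom_segmentation_to_phrase_py s → Spec_segmentation_to_phrase_py s (segmentation_to_phrase_py s)

-- ===== LEMMAS AND PROOFS =====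

-- B's prefix-sum fold, abbreviated for the proofs
def pvExtend (phrase : List Int) (ns : List Int) : List Int :=
  ns.foldl (fun r n => r ++ [(PySem.List.pyGet? r (-1)).getD 0 + n]) phrase

lemma pvDropWhile_append (p : Char → Bool) (ds ys : List Char)
    (h : ∀ x ∈ ds, p x = true) : (ds ++ ys).dropWhile p = ys.dropWhile p := by
  induction ds with
  | nil => simp
  | cons e es ihe =>
    rw [List.cons_append, List.dropWhile_cons, if_pos (h e (by simp))]
    exact ihe (fun x hx => h x (by simp [hx]))

lemma pvTakeWhile_append (p : Char → Bool) (ds ys : List Char)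
    (h : ∀ x ∈ ds, p x = true) (hy : ys.takeWhile p = []) :
    (ds ++ ys).takeWhile p = ds := by
  induction ds with
  | nil => simpa using hy
  | cons e es ihe =>
    rw [List.cons_append, List.takeWhile_cons, if_pos (h e (by simp))]
    rw [ihe (fun x hx => h x (by simp [hx]))]

lemma pvTermRuns_all_digits (m : List Char) (h : ∀ c ∈ m, PySem.Chars.isdigit c = true) :
    pvTermRuns m = [] := by
  induction m with
  | nil => simp [pvTermRuns]
  | cons c cs ih =>
    have hc := h c (by simp)
    have hcs : cs.dropWhile PySem.Chars.isdigit = [] := by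
      rw [List.dropWhile_eq_nil_iff]
      intro x hx; exact h x (by simp [hx])
    simp [pvTermRuns, hc, hcs]

lemma pvTermRuns_skip (c : Char) (hc : PySem.Chars.isdigit c = false) (xs : List Char) :
    pvTermRuns (c :: xs) = pvTermRuns xs := by
  simp [pvTermRuns, hc]

lemma pvTermRuns_flush (m : List Char) (hm : m ≠ [])
    (h : ∀ c ∈ m, PySem.Chars.isdigit c = true)
    (c : Char) (hc : PySem.Chars.isdigit c = false) (xs : List Char) :
    pvTermRuns (m ++ c :: xs) = pvIntOfDigits m :: pvTermRuns xs := by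
  match m with
  | d :: ds =>
    have hd := h d (by simp)
    have hds : ∀ x ∈ ds, PySem.Chars.isdigit x = true := fun x hx => h x (by simp [hx])
    have hdrop : (ds ++ c :: xs).dropWhile PySem.Chars.isdigit = c :: xs := by
      rw [pvDropWhile_append _ _ _ hds, List.dropWhile_cons, if_neg (by simp [hc])]
    have htake : (ds ++ c :: xs).takeWhile PySem.Chars.isdigit = ds := by
      rw [pvTakeWhile_append _ _ _ hds]
      rw [List.takeWhile_cons, if_neg (by simp [hc])]
    rw [List.cons_append]
    simp [pvTermRuns, hd, hdrop, htake, hc]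

lemma pvALoop_eq (l : List Char) : ∀ (phrase : List Int) (memo : List Char),
    (∀ c ∈ memo, PySem.Chars.isdigit c = true) →
    pvALoop l phrase memo =
      if '\\' ∈ l then pvExtend phrase (pvTermRuns (memo ++ l.takeWhile (· ≠ '\\')))
      else PySem.List.slice (pvExtend phrase (pvTermRuns (memo ++ l))) none (some (-1)) := by
  induction l with
  | nil =>
    intro phrase memo hmemo
    simp [pvALoop, pvTermRuns_all_digits memo hmemo, pvExtend]
  | cons i rest ih =>
    intro phrase memo hmemo
    by_cases hbs : i = '\\'
    · subst hbs
      rw [show pvALoop ('\\' :: rest) phrase memo = phrase from by simp [pvALoop]]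
      rw [if_pos (List.mem_cons_self), List.takeWhile_cons, if_neg (by simp)]
      simp [pvTermRuns_all_digits memo hmemo, pvExtend]
    · have hne : ('\\' ∈ i :: rest) = ('\\' ∈ rest) := by
        apply propext; constructor
        · intro h
          rcases List.mem_cons.mp h with h | h
          · exact absurd h.symm hbs
          · exact h
        · exact fun h => List.mem_cons_of_mem _ h
      have htw : (i :: rest).takeWhile (fun x => decide (x ≠ '\\'))
          = i :: rest.takeWhile (fun x => decide (x ≠ '\\')) := by
        rw [List.takeWhile_cons, if_pos (by simpa using hbs)]
      by_cases hd : PySem.Chars.isdigit i = true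
      · rw [show pvALoop (i :: rest) phrase memo = pvALoop rest phrase (memo ++ [i]) from by
          simp [pvALoop, hbs, hd]]
        rw [ih phrase (memo ++ [i]) (by
          intro c hc
          rcases List.mem_append.mp hc with h | h
          · exact hmemo c h
          · simp at h; subst h; exact hd)]
        have happ : ∀ X : List Char, (memo ++ [i]) ++ X = memo ++ i :: X := by
          intro X; simp
        simp only [hne, htw]
        rw [happ, happ]
      · have hd' : PySem.Chars.isdigit i = false := by simpa using hd
        by_cases hm : memo = []
        · subst hm
          rw [show pvALoop (i :: rest) phrase [] = pvALoop rest phrase [] from by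
            simp [pvALoop, hbs, hd]]
          rw [ih phrase [] (by simp)]
          simp only [hne, htw]
          simp only [List.nil_append, pvTermRuns_skip i hd']
        · rw [show pvALoop (i :: rest) phrase memo
              = pvALoop rest (phrase ++ [(PySem.List.pyGet? phrase (-1)).getD 0 + pvIntOfDigits memo]) [] from by
            simp [pvALoop, hbs, hd, hm]]
          rw [ih _ [] (by simp)]
          simp only [hne, htw]
          have hflush : ∀ ys, pvTermRuns (memo ++ i :: ys) = pvIntOfDigits memo :: pvTermRuns ys :=
            fun ys => pvTermRuns_flush memo hm hmemo i hd' ys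
          simp only [List.nil_append, hflush, pvExtend, List.foldl_cons]

lemma pvTakeWhile_ne_of_not_mem (l : List Char) (h : '\\' ∉ l) :
    l.takeWhile (· ≠ '\\') = l := by
  rw [List.takeWhile_eq_self_iff]
  intro x hx
  simp only [decide_eq_true_eq]
  intro hE; subst hE; exact h hx

-- ===== VERDICT (by name: the statement is the Claim_ definition above) =====
theorem segmentation_to_phrase_py_spec : Claim_equal_segmentation_to_phrase_py := by
  intro s _
  unfold Spec_segmentation_to_phrase_py segmentation_to_phrase_py
  simp only [segmentation_to_phrase_py_alt]
  rw [pvALoop_eq s.toList [1] [] (by simp)]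
  by_cases hbs : '\\' ∈ s.toList
  · rw [if_pos hbs, if_pos (by simpa [List.contains_iff_mem] using hbs)]
    simp [pvExtend]
  · rw [if_neg hbs, if_neg (by simpa [List.contains_iff_mem] using hbs)]
    rw [pvTakeWhile_ne_of_not_mem s.toList hbs]
    simp [pvExtend]
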